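-- pv_equiv track=rewrite | github.com/grimmweeper/aoc-2023 | day8/day8-1.py | traverseNetwork
-- ===== SOURCE A (Python) =====
-- def traverseNetwork(instructions, networkDict, current, step):
--     for direction in instructions:
--         if current == 'ZZZ':
--             return step
--         if direction == 'L':
--             current = networkDict[current][0]
--         elif direction == 'R':
--             current = networkDict[current][1]
--         step += 1
--     return traverseNetwork(instructions, networkDict, current, step)
-- ===== SOURCE B (Python) =====
-- def traverseNetwork(instructions, networkDict, current, step):
--     n = len(instructions)
--     i = 0
--     while True:
--         if current == 'ZZZ':
--             return step
--         direction = instructions[i % n]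
--         if direction == 'L':
--             current = networkDict[current][0]
--         elif direction == 'R':
--             current = networkDict[current][1]
--         step += 1
--         i += 1
-- ===== Notes on version B (the rewrite author's own statement) =====
-- stated objective: idiomatic
-- what changed: Replaces the for-loop-plus-tail-recursive-restart with a single non-recursive while-loop that walks the instruction string cyclically via i % len(instructions), maintaining only current and step.
import Mathlib
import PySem

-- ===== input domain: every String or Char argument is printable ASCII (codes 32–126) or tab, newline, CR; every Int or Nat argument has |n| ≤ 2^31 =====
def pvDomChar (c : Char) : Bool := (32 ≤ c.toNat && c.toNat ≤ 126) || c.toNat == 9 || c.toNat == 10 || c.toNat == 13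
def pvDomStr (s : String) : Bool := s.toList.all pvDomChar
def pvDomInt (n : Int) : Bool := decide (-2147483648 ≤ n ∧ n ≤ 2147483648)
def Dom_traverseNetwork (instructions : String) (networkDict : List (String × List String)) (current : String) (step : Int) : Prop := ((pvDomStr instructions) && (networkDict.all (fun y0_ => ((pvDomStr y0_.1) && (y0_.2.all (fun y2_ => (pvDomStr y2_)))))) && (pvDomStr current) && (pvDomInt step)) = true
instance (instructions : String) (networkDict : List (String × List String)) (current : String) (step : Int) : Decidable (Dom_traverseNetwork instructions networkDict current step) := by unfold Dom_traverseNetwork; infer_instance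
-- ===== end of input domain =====

-- B replaces A's for-loop-plus-tail-recursive-restart by one non-recursive loop with a cyclic
-- index (idiomatic; same step count). Both ports are fueled (Python A's recursion has no bound);
-- under Pre_ the fuel is never exhausted, so the junk value 0 at fuel 0 is unreachable.

-- networkDict[current][j] : KeyError/IndexError become none; the "" default is only ever taken
-- outside Pre_ (which demands every lookup on the walk succeeds).
def nwGet (nd : List (String × List String)) (c : String) (j : Int) : String :=
  (PySem.List.pyGet? (((PySem.Dict.mk nd).get? c).getD []) j).getD ""

-- ===== PORT A =====
-- the for-loop over the instruction characters
def innerA (nd : List (String × List String)) : List Char → String → Int → Sum Int (String × Int)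
  | [], c, s => Sum.inr (c, s)
  | dir :: rest, c, s =>
    if c == "ZZZ" then Sum.inl s
    else innerA nd rest
      (if dir == 'L' then nwGet nd c 0 else if dir == 'R' then nwGet nd c 1 else c) (s + 1)

-- the tail-recursive restart, fueled (Python A recurses unboundedly; fuel 0 → junk 0, unreachable under Pre_)
def goA (nd : List (String × List String)) (L : List Char) : String → Int → Nat → Int
  | _, _, 0 => 0
  | c, s, fuel+1 =>
    match innerA nd L c s with
    | Sum.inl r => r
    | Sum.inr (c', s') => goA nd L c' s' fuel

-- generous pigeonhole bound on the number of steps a terminating walk can take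
def pvBound (instructions : String) (nd : List (String × List String)) : Nat :=
  (nd.length + (nd.map (fun p => p.2.length)).sum + 2) * (instructions.toList.length + 1)

def traverseNetwork (instructions : String) (networkDict : List (String × List String)) (current : String) (step : Int) : Int :=
  goA networkDict instructions.toList current step (pvBound instructions networkDict + 1)

-- ===== PORT B =====
-- the single while-loop with cyclic index, fueled (Python B's `while True`; fuel 0 → junk 0, unreachable under Pre_)
def goB (nd : List (String × List String)) (L : List Char) (n : Nat) : Nat → String → Int → Nat → Int
  | _, _, _, 0 => 0
  | i, c, s, fuel+1 =>
    if c == "ZZZ" then s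
    else
      let dir := L.getD (i % n) ' '
      goB nd L n (i+1)
        (if dir == 'L' then nwGet nd c 0 else if dir == 'R' then nwGet nd c 1 else c) (s + 1) fuel

def traverseNetwork_alt (instructions : String) (networkDict : List (String × List String)) (current : String) (step : Int) : Int :=
  goB networkDict instructions.toList instructions.toList.length 0 current step (pvBound instructions networkDict + 1)

-- ===== PRECONDITION & SPEC =====
-- one step of the walk (the state after the check, before instruction i of the cyclic sequence)
def pvStep (nd : List (String × List String)) (L : List Char) (c : String) (i : Nat) : String :=
  let dir := L.getD (i % L.length) ' '
  if dir == 'L' then nwGet nd c 0 else if dir == 'R' then nwGet nd c 1 else c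

-- the state after k steps, starting at c with instruction index i
def pvStateG (nd : List (String × List String)) (L : List Char) (c : String) (i : Nat) : Nat → String
  | 0 => c
  | k+1 => pvStep nd L (pvStateG nd L c i k) (i + k)

-- step k performs only successful lookups (Python would raise KeyError/IndexError otherwise)
def pvStepOk (nd : List (String × List String)) (L : List Char) (c : String) (i : Nat) : Bool :=
  let dir := L.getD (i % L.length) ' '
  if dir == 'L' then (PySem.List.pyGet? (((PySem.Dict.mk nd).get? c).getD []) 0).isSome
  else if dir == 'R' then (PySem.List.pyGet? (((PySem.Dict.mk nd).get? c).getD []) 1).isSome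
  else true

def pvOk (nd : List (String × List String)) (L : List Char) (c : String) : Nat → Bool
  | 0 => true
  | k+1 => pvOk nd L c k && pvStepOk nd L (pvStateG nd L c 0 k) k

-- Pre_: exactly the inputs on which Python A returns: the instructions are nonempty and the cyclic
-- walk reaches "ZZZ" (within the pigeonhole bound — a terminating walk repeats no (node, index mod n)
-- pair before its first "ZZZ") with every dictionary/list lookup on the way succeeding.
-- Termination is semantic, so the condition necessarily speaks about the walk's states.
def Pre_traverseNetwork (instructions : String) (networkDict : List (String × List String)) (current : String) (step : Int) : Prop :=
  instructions.toList ≠ [] ∧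
  ∃ k < pvBound instructions networkDict + 1,
    pvOk networkDict instructions.toList current k = true ∧
    pvStateG networkDict instructions.toList current 0 k = "ZZZ"

instance (instructions : String) (networkDict : List (String × List String)) (current : String) (step : Int) : Decidable (Pre_traverseNetwork instructions networkDict current step) := by
  unfold Pre_traverseNetwork; infer_instance

def pvWitness_traverseNetwork : String × (List (String × List String)) × String × Int :=
  ("L", [("AAA", ["ZZZ", "AAA"])], "AAA", 0)

def Spec_traverseNetwork (instructions : String) (networkDict : List (String × List String)) (current : String) (step : Int) (out : Int) : Prop := out = traverseNetwork_alt instructions networkDict current step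
instance (instructions : String) (networkDict : List (String × List String)) (current : String) (step : Int) (out : Int) : Decidable (Spec_traverseNetwork instructions networkDict current step out) := by unfold Spec_traverseNetwork; infer_instance

-- ===== CLAIM (what is proved, stated in full; the proofs are below) =====
def Claim_equal_traverseNetwork : Prop := ∀ (instructions : String) (networkDict : List (String × List String)) (current : String) (step : Int), Dom_traverseNetwork instructions networkDict current step → Pre_traverseNetwork instructions networkDict current step → Spec_traverseNetwork instructions networkDict current step (traverseNetwork instructions networkDict current step)

-- ===== LEMMAS AND PROOFS =====

-- bottom shift: one step off the front of a walk
theorem pvStateG_shift (nd : List (String × List String)) (L : List Char) (c : String) (i j : Nat) :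
    pvStateG nd L c i (j+1) = pvStateG nd L (pvStep nd L c i) (i+1) j := by
  induction j generalizing c i with
  | zero => rfl
  | succ j ih =>
    show pvStep nd L (pvStateG nd L c i (j+1)) (i + (j+1)) = _
    rw [ih]
    show _ = pvStep nd L (pvStateG nd L (pvStep nd L c i) (i+1) j) ((i+1) + j)
    congr 1
    omega

-- splitting a walk
theorem pvStateG_add (nd : List (String × List String)) (L : List Char) (c : String) (i a b : Nat) :
    pvStateG nd L c i (a + b) = pvStateG nd L (pvStateG nd L c i a) (i + a) b := by
  induction b with
  | zero => rfl
  | succ b ih =>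
    show pvStep nd L (pvStateG nd L c i (a + b)) (i + (a + b)) = pvStep nd L (pvStateG nd L (pvStateG nd L c i a) (i+a) b) ((i + a) + b)
    rw [ih]; congr 1; omega

theorem mod_succ_eq (i n : Nat) (h : i % n + 1 < n) : (i+1) % n = i % n + 1 := by
  rw [Nat.add_mod]
  have h1 : 1 % n = 1 := Nat.mod_eq_of_lt (by omega)
  rw [h1]
  exact Nat.mod_eq_of_lt (by omega)

-- B's loop computes step + k when the first "ZZZ" of the walk is at step k
theorem goB_eq (nd : List (String × List String)) (L : List Char) :
    ∀ (k i : Nat) (c : String) (s : Int) (f : Nat),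
    pvStateG nd L c i k = "ZZZ" → (∀ j < k, pvStateG nd L c i j ≠ "ZZZ") → k < f →
    goB nd L L.length i c s f = s + (k : Int) := by
  intro k
  induction k with
  | zero =>
    intro i c s f hZ _ hf
    obtain ⟨f', rfl⟩ : ∃ f', f = f' + 1 := ⟨f - 1, by omega⟩
    have hc : c = "ZZZ" := hZ
    simp [goB, hc]
  | succ k ih =>
    intro i c s f hZ hmin hf
    obtain ⟨f', rfl⟩ : ∃ f', f = f' + 1 := ⟨f - 1, by omega⟩
    have hc : c ≠ "ZZZ" := hmin 0 (by omega)
    have h1 : goB nd L L.length i c s (f' + 1) = goB nd L L.length (i+1) (pvStep nd L c i) (s+1) f' := by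
      simp only [goB, pvStep]
      rw [if_neg (by simpa using hc)]
    rw [h1, ih (i+1) (pvStep nd L c i) (s+1) f'
        (by rw [← pvStateG_shift]; exact hZ)
        (fun j hj => by rw [← pvStateG_shift]; exact hmin (j+1) (by omega))
        (by omega)]
    push_cast
    omega

-- characterisation of one pass of A's for-loop over a suffix of the instructions
theorem innerA_char (nd : List (String × List String)) (L : List Char) :
    ∀ (l : List Char) (i : Nat) (c : String) (s : Int),
    l = L.drop (i % L.length) →
    (∃ p, p < l.length ∧ pvStateG nd L c i p = "ZZZ" ∧ (∀ j < p, pvStateG nd L c i j ≠ "ZZZ")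
        ∧ innerA nd l c s = Sum.inl (s + (p : Int)))
    ∨ ((∀ j < l.length, pvStateG nd L c i j ≠ "ZZZ")
        ∧ innerA nd l c s = Sum.inr (pvStateG nd L c i l.length, s + (l.length : Int))) := by
  intro l
  induction l with
  | nil =>
    intro i c s _
    right
    refine ⟨fun j hj => absurd hj (by simp), ?_⟩
    simp [innerA, pvStateG]
  | cons dir rest ih =>
    intro i c s hl
    have hdir : L.getD (i % L.length) ' ' = dir := by
      have h0 : L[i % L.length + 0]? = some dir := by
        rw [← List.getElem?_drop, ← hl]; rfl
      simp only [Nat.add_zero] at h0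
      simp [List.getD, h0]
    by_cases hc : c = "ZZZ"
    · left
      refine ⟨0, by simp, hc, by omega, ?_⟩
      simp [innerA, hc]
    · have hstep : (if dir == 'L' then nwGet nd c 0 else if dir == 'R' then nwGet nd c 1 else c)
          = pvStep nd L c i := by
        simp only [pvStep, hdir]
      have hrest : innerA nd (dir :: rest) c s = innerA nd rest (pvStep nd L c i) (s + 1) := by
        simp only [innerA]
        rw [if_neg (by simpa using hc), hstep]
      rcases eq_or_ne rest [] with hre | hre
      · subst hre
        right
        constructor
        · intro j hj
          have hj0 : j = 0 := by simp at hj; omega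
          subst hj0
          exact fun h => hc h
        · rw [hrest]
          have h1 : pvStateG nd L c i 1 = pvStep nd L c i := rfl
          simp [innerA, h1]
      · have hlen : i % L.length + 1 < L.length := by
          have h1 : rest = L.drop (i % L.length + 1) := by
            have := congrArg (List.drop 1) hl
            simpa [List.drop_drop, Nat.add_comm] using this
          have h2 : rest.length = L.length - (i % L.length + 1) := by
            rw [h1]; simp
          have : rest.length ≠ 0 := by simpa using hre
          omega
        have hmod : rest = L.drop ((i+1) % L.length) := by
          rw [mod_succ_eq i L.length hlen]
          have := congrArg (List.drop 1) hl
          simpa [List.drop_drop, Nat.add_comm] using this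
        rcases ih (i+1) (pvStep nd L c i) (s+1) hmod with ⟨p, hp, hZ, hmin, heq⟩ | ⟨hall, heq⟩
        · left
          refine ⟨p+1, by simp; omega, ?_, ?_, ?_⟩
          · rw [pvStateG_shift]; exact hZ
          · intro j hj
            cases j with
            | zero => exact fun h => hc h
            | succ j => rw [pvStateG_shift]; exact hmin j (by omega)
          · rw [hrest, heq]
            congr 1
            simp only [Nat.cast_add, Nat.cast_one]
            ring
        · right
          constructor
          · intro j hj
            cases j with
            | zero => exact fun h => hc h
            | succ j =>
              rw [pvStateG_shift]
              exact hall j (by simpa using hj)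
          · rw [hrest, heq]
            have h1 : (dir :: rest).length = rest.length + 1 := by simp
            rw [h1, pvStateG_shift]
            congr 1
            simp only [Nat.cast_add, Nat.cast_one]
            ring

-- A's restart loop computes step + k when the first "ZZZ" of the walk is at step k
theorem goA_eq (nd : List (String × List String)) (L : List Char) (hL : L ≠ []) :
    ∀ (fA k i : Nat) (c : String) (s : Int),
    i % L.length = 0 → pvStateG nd L c i k = "ZZZ" → (∀ j < k, pvStateG nd L c i j ≠ "ZZZ") → k < fA →
    goA nd L c s fA = s + (k : Int) := by
  intro fA
  induction fA with
  | zero => intro k i c s _ _ _ h; omega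
  | succ f ih =>
    intro k i c s hi hZ hmin hf
    have hLdrop : L = L.drop (i % L.length) := by rw [hi]; rfl
    have hn : 0 < L.length := List.length_pos_iff.mpr hL
    rcases innerA_char nd L L i c s hLdrop with ⟨p, hp, hpZ, hpmin, heq⟩ | ⟨hall, heq⟩
    · have hpk : p = k := by
        rcases lt_trichotomy p k with h | h | h
        · exact absurd hpZ (hmin p h)
        · exact h
        · exact absurd hZ (hpmin k h)
      show goA nd L c s (f+1) = _
      simp only [goA, heq]
      rw [hpk]
    · have hkn : L.length ≤ k := by
        by_contra h
        exact hall k (by omega) hZ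
      show goA nd L c s (f+1) = _
      simp only [goA, heq]
      have hsplit : pvStateG nd L (pvStateG nd L c i L.length) (i + L.length) (k - L.length) = "ZZZ" := by
        rw [← pvStateG_add]
        have : L.length + (k - L.length) = k := by omega
        rw [this]; exact hZ
      have hmins : ∀ j < k - L.length, pvStateG nd L (pvStateG nd L c i L.length) (i + L.length) j ≠ "ZZZ" := by
        intro j hj
        rw [← pvStateG_add]
        exact hmin (L.length + j) (by omega)
      have himod : (i + L.length) % L.length = 0 := by
        rw [Nat.add_mod, hi, Nat.mod_self]
        simp
      rw [ih (k - L.length) (i + L.length) _ _ himod hsplit hmins (by omega)]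
      omega

-- ===== VERDICT (by name: the statement is the Claim_ definition above) =====
theorem traverseNetwork_spec : Claim_equal_traverseNetwork := by
  intro instructions networkDict current step _ hPre
  obtain ⟨hne, k, hk, _, hZ⟩ := hPre
  unfold Spec_traverseNetwork traverseNetwork traverseNetwork_alt
  have hex : ∃ m, pvStateG networkDict instructions.toList current 0 m = "ZZZ" := ⟨k, hZ⟩
  set km := Nat.find hex with hkm
  have hkmZ : pvStateG networkDict instructions.toList current 0 km = "ZZZ" := Nat.find_spec hex
  have hkmmin : ∀ j < km, pvStateG networkDict instructions.toList current 0 j ≠ "ZZZ" :=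
    fun j hj => Nat.find_min hex hj
  have hkmle : km ≤ k := Nat.find_min' hex hZ
  rw [goA_eq networkDict instructions.toList hne (pvBound instructions networkDict + 1) km 0
      current step (Nat.zero_mod _) hkmZ hkmmin (by omega),
    goB_eq networkDict instructions.toList km 0 current step
      (pvBound instructions networkDict + 1) hkmZ hkmmin (by omega)]
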